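-- pv_equiv track=rewrite | github.com/dayglo/rightplace | server/app/services/rollcall_generator_service.py | _get_descendant_ids_cached
-- ===== SOURCE A (Python) =====
-- def _get_descendant_ids_cached(
--     location_id: str, children_map: dict[str, list[str]]
-- ) -> list[str]:
--     """Get descendant location IDs using cached hierarchy map."""
--     descendants = [location_id]
--     queue = [location_id]
--
--     while queue:
--         current_id = queue.pop(0)
--         children = children_map.get(current_id, [])
--
--         for child_id in children:
--             descendants.append(child_id)
--             queue.append(child_id)
--
--     return descendants
-- ===== SOURCE B (Python) =====
-- def _get_descendant_ids_cached(
--     location_id: str, children_map: dict[str, list[str]]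
-- ) -> list[str]:
--     """Get descendant location IDs using cached hierarchy map."""
--     result = [location_id]
--     i = 0
--     while i < len(result):
--         result.extend(children_map.get(result[i], []))
--         i += 1
--     return result
-- ===== Notes on version B (the rewrite author's own statement) =====
-- stated objective: simpler
-- what changed: The separate FIFO queue with pop(0) is removed: the output list itself serves as the BFS worklist, scanned by an advancing index while children are appended to it.
import Mathlib
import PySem

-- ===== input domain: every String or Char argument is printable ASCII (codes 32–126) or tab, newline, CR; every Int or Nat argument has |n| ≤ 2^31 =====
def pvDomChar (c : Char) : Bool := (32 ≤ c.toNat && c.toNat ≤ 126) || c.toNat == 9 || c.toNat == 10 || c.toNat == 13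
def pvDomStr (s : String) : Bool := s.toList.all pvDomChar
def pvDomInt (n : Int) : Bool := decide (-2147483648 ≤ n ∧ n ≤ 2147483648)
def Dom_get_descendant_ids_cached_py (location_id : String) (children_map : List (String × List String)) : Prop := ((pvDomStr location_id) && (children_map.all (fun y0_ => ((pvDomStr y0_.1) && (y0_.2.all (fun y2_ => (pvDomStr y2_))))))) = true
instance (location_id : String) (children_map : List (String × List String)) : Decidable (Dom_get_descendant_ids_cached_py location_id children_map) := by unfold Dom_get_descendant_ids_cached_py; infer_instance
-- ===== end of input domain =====

-- B removes A's separate FIFO queue: the output list itself is the BFS worklist, scanned by an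
-- advancing index while children are appended to it; objective: simpler (one list, no pop(0)).
-- Both Pythons loop forever on a cycle reachable from location_id; both Lean ports are bounded by
-- the same fuel (which exceeds the number of loop iterations on every terminating input), so they
-- agree step for step on every input and the equivalence needs no precondition.

-- dict.get(k, []) on the association list: first match, as in the type convention
def pvChildren (children_map : List (String × List String)) (k : String) : List String :=
  (children_map.lookup k).getD []

-- fuel shared by both ports: strictly more than the number of queue pops on any terminating input
-- (≤ number of root paths ≤ (maxChildren+1)^(entries+1))
def pvFuel (children_map : List (String × List String)) : Nat :=
  (children_map.foldl (fun m kv => max m kv.2.length) 0 + 1) ^ (children_map.length + 1) + 1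

-- ===== PORT A =====
-- while queue: current = queue.pop(0); for child in children: descendants.append; queue.append
def pvALoop (children_map : List (String × List String)) :
    Nat → List String → List String → List String
  | 0, descendants, _ => descendants
  | fuel + 1, descendants, queue =>
    match queue with
    | [] => descendants
    | current_id :: rest =>
      let st := (pvChildren children_map current_id).foldl
        (fun (dq : List String × List String) child_id => (dq.1 ++ [child_id], dq.2 ++ [child_id]))
        (descendants, rest)
      pvALoop children_map fuel st.1 st.2

def get_descendant_ids_cached_py (location_id : String) (children_map : List (String × List String)) : List String :=
  pvALoop children_map (pvFuel children_map) [location_id] [location_id]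

-- ===== PORT B =====
-- while i < len(result): result.extend(children_map.get(result[i], [])); i += 1
def pvBLoop (children_map : List (String × List String)) :
    Nat → List String → Nat → List String
  | 0, result, _ => result
  | fuel + 1, result, i =>
    if h : i < result.length then
      pvBLoop children_map fuel (result ++ pvChildren children_map result[i]) (i + 1)
    else result

def get_descendant_ids_cached_py_alt (location_id : String) (children_map : List (String × List String)) : List String :=
  pvBLoop children_map (pvFuel children_map) [location_id] 0

-- ===== PRECONDITION & SPEC =====
def Spec_get_descendant_ids_cached_py (location_id : String) (children_map : List (String × List String)) (out : List String) : Prop := out = get_descendant_ids_cached_py_alt location_id children_map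
instance (location_id : String) (children_map : List (String × List String)) (out : List String) : Decidable (Spec_get_descendant_ids_cached_py location_id children_map out) := by unfold Spec_get_descendant_ids_cached_py; infer_instance

-- ===== CLAIM (what is proved, stated in full; the proofs are below) =====
def Claim_equal_get_descendant_ids_cached_py : Prop := ∀ (location_id : String) (children_map : List (String × List String)), Dom_get_descendant_ids_cached_py location_id children_map → Spec_get_descendant_ids_cached_py location_id children_map (get_descendant_ids_cached_py location_id children_map)

-- ===== LEMMAS AND PROOFS =====

-- A's inner for-loop appends the children to both lists
theorem pvFold_append (children : List String) (d q : List String) :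
    children.foldl (fun (dq : List String × List String) c => (dq.1 ++ [c], dq.2 ++ [c])) (d, q)
      = (d ++ children, q ++ children) := by
  induction children generalizing d q with
  | nil => simp
  | cons c cs ih => simp [List.foldl, ih]

-- invariant: A's (descendants, queue) is B's (result, result.drop i); same fuel, step for step
theorem pvLoop_agree (children_map : List (String × List String)) :
    ∀ (fuel : Nat) (result : List String) (i : Nat), i ≤ result.length →
      pvALoop children_map fuel result (result.drop i) = pvBLoop children_map fuel result i := by
  intro fuel
  induction fuel with
  | zero => intro result i _; rfl
  | succ n ih =>
    intro result i hle
    rcases lt_or_eq_of_le hle with hlt | heq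
    · have hdrop : result.drop i = result[i] :: result.drop (i + 1) :=
        List.drop_eq_getElem_cons hlt
      rw [pvALoop.eq_def, hdrop]
      simp only [pvFold_append]
      rw [pvBLoop, dif_pos hlt]
      have hq : result.drop (i + 1) ++ pvChildren children_map result[i]
          = (result ++ pvChildren children_map result[i]).drop (i + 1) := by
        rw [List.drop_append_of_le_length (by omega)]
      rw [hq]
      exact ih (result ++ pvChildren children_map result[i]) (i + 1) (by simp; omega)
    · rw [pvBLoop, dif_neg (by omega)]
      rw [pvALoop.eq_def]
      have : result.drop i = [] := List.drop_eq_nil_of_le (by omega)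
      rw [this]

-- ===== VERDICT (by name: the statement is the Claim_ definition above) =====
theorem get_descendant_ids_cached_py_spec : Claim_equal_get_descendant_ids_cached_py := by
  intro location_id children_map _
  unfold Spec_get_descendant_ids_cached_py get_descendant_ids_cached_py get_descendant_ids_cached_py_alt
  exact pvLoop_agree children_map (pvFuel children_map) [location_id] 0 (by simp)
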